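-- pv_equiv track=rewrite | github.com/Dheeraj-2022/Multilingual-Translator | utils/language_config.py | get_language_family
-- ===== SOURCE A (Python) =====
-- from typing import Dict, List, Tuple, Optional
--
-- LANGUAGE_FAMILIES = {
--     'Indo-European': {
--         'Germanic': ['en', 'de'],
--         'Romance': ['es', 'fr', 'pt', 'it'],
--         'Indo-Aryan': ['hi', 'bn', 'mr', 'gu', 'ur'],
--         'Slavic': ['ru']
--     },
--     'Dravidian': ['ta', 'te'],
--     'Semitic': ['ar'],
--     'Sino-Tibetan': ['zh'],
--     'Japonic': ['ja'],
--     'Koreanic': ['ko']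
-- }
--
-- def get_language_family(code: str) -> Tuple[str, str]:
--     """
--     Get language family and subfamily.
--
--     Args:
--         code: Language code
--
--     Returns:
--         Tuple of (family, subfamily)
--     """
--     for family, subfamilies in LANGUAGE_FAMILIES.items():
--         if isinstance(subfamilies, dict):
--             for subfamily, languages in subfamilies.items():
--                 if code in languages:
--                     return (family, subfamily)
--         elif isinstance(subfamilies, list):
--             if code in subfamilies:
--                 return (family, 'Main')
--     return ('Unknown', 'Unknown')
-- ===== SOURCE B (Python) =====
-- from typing import Tuple
--
-- LANGUAGE_FAMILIES = {
--     'Indo-European': {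
--         'Germanic': ['en', 'de'],
--         'Romance': ['es', 'fr', 'pt', 'it'],
--         'Indo-Aryan': ['hi', 'bn', 'mr', 'gu', 'ur'],
--         'Slavic': ['ru']
--     },
--     'Dravidian': ['ta', 'te'],
--     'Semitic': ['ar'],
--     'Sino-Tibetan': ['zh'],
--     'Japonic': ['ja'],
--     'Koreanic': ['ko']
-- }
--
-- # Flat index built once at module load: code -> (family, subfamily)
-- _FLAT = {}
-- for _family, _subfamilies in LANGUAGE_FAMILIES.items():
--     if isinstance(_subfamilies, dict):
--         for _subfamily, _languages in _subfamilies.items():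
--             for _c in _languages:
--                 _FLAT[_c] = (_family, _subfamily)
--     else:
--         for _c in _subfamilies:
--             _FLAT[_c] = (_family, 'Main')
--
-- def get_language_family(code: str) -> Tuple[str, str]:
--     return _FLAT.get(code, ('Unknown', 'Unknown'))
-- ===== Notes on version B (the rewrite author's own statement) =====
-- stated objective: idiomatic
-- what changed: Replaced the per-call nested scan over the family table by a flat dict {code: (family, subfamily)} built once at module load; the function body is a single dict lookup with a ('Unknown','Unknown') default.
import Mathlib
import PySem

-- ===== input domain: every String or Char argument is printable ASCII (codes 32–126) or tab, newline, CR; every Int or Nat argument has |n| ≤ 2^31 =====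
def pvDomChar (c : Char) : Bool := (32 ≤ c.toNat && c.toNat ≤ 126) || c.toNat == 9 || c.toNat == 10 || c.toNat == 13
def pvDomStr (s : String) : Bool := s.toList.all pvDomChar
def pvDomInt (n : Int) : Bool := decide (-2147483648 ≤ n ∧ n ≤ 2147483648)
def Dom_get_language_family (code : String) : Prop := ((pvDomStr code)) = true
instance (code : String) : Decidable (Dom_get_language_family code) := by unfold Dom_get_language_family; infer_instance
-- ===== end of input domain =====

-- B replaces A's per-call nested scan by a flat table {code ↦ (family, subfamily)} built once; the call is a single lookup (idiomatic).

-- ===== PORT A =====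
-- the mixed dict-or-list values of LANGUAGE_FAMILIES
inductive SubF
  | d : List (String × List String) → SubF
  | l : List String → SubF

def famTable : List (String × SubF) :=
  [("Indo-European", .d [("Germanic", ["en", "de"]),
                         ("Romance", ["es", "fr", "pt", "it"]),
                         ("Indo-Aryan", ["hi", "bn", "mr", "gu", "ur"]),
                         ("Slavic", ["ru"])]),
   ("Dravidian", .l ["ta", "te"]),
   ("Semitic", .l ["ar"]),
   ("Sino-Tibetan", .l ["zh"]),
   ("Japonic", .l ["ja"]),
   ("Koreanic", .l ["ko"])]

-- inner loop: 'for subfamily, languages in subfamilies.items(): if code in languages: return …'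
def scanSubs (code family : String) : List (String × List String) → Option (String × String)
  | [] => none
  | (subfamily, languages) :: rest =>
      if languages.contains code then some (family, subfamily) else scanSubs code family rest

-- outer loop: 'for family, subfamilies in LANGUAGE_FAMILIES.items(): …'
def loopA (code : String) : List (String × SubF) → String × String
  | [] => ("Unknown", "Unknown")
  | (family, SubF.d subs) :: rest =>
      match scanSubs code family subs with
      | some r => r
      | none => loopA code rest
  | (family, SubF.l langs) :: rest =>
      if langs.contains code then (family, "Main") else loopA code rest

def get_language_family (code : String) : String × String :=
  loopA code famTable

-- ===== PORT B =====
-- module-level build of _FLAT (run once, not per call)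
def flatTable : PySem.Dict String (String × String) :=
  famTable.foldl
    (fun d fs =>
      match fs with
      | (family, SubF.d subs) =>
          subs.foldl (fun d sl => sl.2.foldl (fun d c => d.insert c (family, sl.1)) d) d
      | (family, SubF.l langs) =>
          langs.foldl (fun d c => d.insert c (family, "Main")) d)
    (PySem.Dict.empty)

def get_language_family_alt (code : String) : String × String :=
  PySem.Dict.getD flatTable code ("Unknown", "Unknown")

-- ===== PRECONDITION & SPEC =====
def Spec_get_language_family (code : String) (out : String × String) : Prop := out = get_language_family_alt code
instance (code : String) (out : String × String) : Decidable (Spec_get_language_family code out) := by unfold Spec_get_language_family; infer_instance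

-- ===== CLAIM (what is proved, stated in full; the proofs are below) =====
def Claim_equal_get_language_family : Prop := ∀ (code : String), Dom_get_language_family code → Spec_get_language_family code (get_language_family code)

-- ===== LEMMAS AND PROOFS =====

-- ===== VERDICT (by name: the statement is the Claim_ definition above) =====
-- flatTable evaluated to its literal association list (kernel computation)
theorem flatTable_eq : flatTable = { items := [("en", ("Indo-European", "Germanic")), ("de", ("Indo-European", "Germanic")), ("es", ("Indo-European", "Romance")), ("fr", ("Indo-European", "Romance")), ("pt", ("Indo-European", "Romance")), ("it", ("Indo-European", "Romance")), ("hi", ("Indo-European", "Indo-Aryan")), ("bn", ("Indo-European", "Indo-Aryan")), ("mr", ("Indo-European", "Indo-Aryan")), ("gu", ("Indo-European", "Indo-Aryan")), ("ur", ("Indo-European", "Indo-Aryan")), ("ru", ("Indo-European", "Slavic")), ("ta", ("Dravidian", "Main")), ("te", ("Dravidian", "Main")), ("ar", ("Semitic", "Main")), ("zh", ("Sino-Tibetan", "Main")), ("ja", ("Japonic", "Main")), ("ko", ("Koreanic", "Main"))] } := by rfl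

theorem get_language_family_spec : Claim_equal_get_language_family := by
  intro code _
  unfold Spec_get_language_family get_language_family get_language_family_alt
  by_cases h0 : code = "en"
  · subst h0; rfl
  by_cases h1 : code = "de"
  · subst h1; rfl
  by_cases h2 : code = "es"
  · subst h2; rfl
  by_cases h3 : code = "fr"
  · subst h3; rfl
  by_cases h4 : code = "pt"
  · subst h4; rfl
  by_cases h5 : code = "it"
  · subst h5; rfl
  by_cases h6 : code = "hi"
  · subst h6; rfl
  by_cases h7 : code = "bn"
  · subst h7; rfl
  by_cases h8 : code = "mr"
  · subst h8; rfl
  by_cases h9 : code = "gu"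
  · subst h9; rfl
  by_cases h10 : code = "ur"
  · subst h10; rfl
  by_cases h11 : code = "ru"
  · subst h11; rfl
  by_cases h12 : code = "ta"
  · subst h12; rfl
  by_cases h13 : code = "te"
  · subst h13; rfl
  by_cases h14 : code = "ar"
  · subst h14; rfl
  by_cases h15 : code = "zh"
  · subst h15; rfl
  by_cases h16 : code = "ja"
  · subst h16; rfl
  by_cases h17 : code = "ko"
  · subst h17; rfl
  rw [flatTable_eq]
  have b0 : ("en" == code) = false := beq_eq_false_iff_ne.mpr (fun h => h0 h.symm)
  have b1 : ("de" == code) = false := beq_eq_false_iff_ne.mpr (fun h => h1 h.symm)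
  have b2 : ("es" == code) = false := beq_eq_false_iff_ne.mpr (fun h => h2 h.symm)
  have b3 : ("fr" == code) = false := beq_eq_false_iff_ne.mpr (fun h => h3 h.symm)
  have b4 : ("pt" == code) = false := beq_eq_false_iff_ne.mpr (fun h => h4 h.symm)
  have b5 : ("it" == code) = false := beq_eq_false_iff_ne.mpr (fun h => h5 h.symm)
  have b6 : ("hi" == code) = false := beq_eq_false_iff_ne.mpr (fun h => h6 h.symm)
  have b7 : ("bn" == code) = false := beq_eq_false_iff_ne.mpr (fun h => h7 h.symm)
  have b8 : ("mr" == code) = false := beq_eq_false_iff_ne.mpr (fun h => h8 h.symm)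
  have b9 : ("gu" == code) = false := beq_eq_false_iff_ne.mpr (fun h => h9 h.symm)
  have b10 : ("ur" == code) = false := beq_eq_false_iff_ne.mpr (fun h => h10 h.symm)
  have b11 : ("ru" == code) = false := beq_eq_false_iff_ne.mpr (fun h => h11 h.symm)
  have b12 : ("ta" == code) = false := beq_eq_false_iff_ne.mpr (fun h => h12 h.symm)
  have b13 : ("te" == code) = false := beq_eq_false_iff_ne.mpr (fun h => h13 h.symm)
  have b14 : ("ar" == code) = false := beq_eq_false_iff_ne.mpr (fun h => h14 h.symm)
  have b15 : ("zh" == code) = false := beq_eq_false_iff_ne.mpr (fun h => h15 h.symm)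
  have b16 : ("ja" == code) = false := beq_eq_false_iff_ne.mpr (fun h => h16 h.symm)
  have b17 : ("ko" == code) = false := beq_eq_false_iff_ne.mpr (fun h => h17 h.symm)
  simp [famTable, loopA, scanSubs, PySem.Dict.getD, PySem.Dict.get?, List.find?, b0, b1, b2, b3, b4, b5, b6, b7, b8, b9, b10, b11, b12, b13, b14, b15, b16, b17, h0, h1, h2, h3, h4, h5, h6, h7, h8, h9, h10, h11, h12, h13, h14, h15, h16, h17]
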